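-- pv_equiv track=rewrite | github.com/jjw2341234/Online-Coding-Study | 프로그래머스/2/42586. 기능개발/기능개발.py | solution
-- ===== SOURCE A (Python) =====
-- def solution(progresses, speeds):
--     answer = [1]
--     res = 0
--     cnt = 1
--     temp = []
--     for i in range(len(progresses)):
--         if (100 - progresses[i]) % speeds[i]:
--             tmp = ((100 - progresses[i])//speeds[i] + 1)
--         else:
--             tmp = (100 - progresses[i]) // speeds[i]
--         res = max(res, tmp)
--         temp.append(res)
--     ind = temp[0]
--     for i in range(1, len(temp)):
--         if temp[i] == ind:
--             answer[-1]+=1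
--         else:
--             answer.append(1)
--             ind = temp[i]
--     return answer
-- ===== SOURCE B (Python) =====
-- def solution(progresses, speeds):
--     answer = []
--     cur = 0
--     ind = 0
--     for p, s in zip(progresses, speeds):
--         d = -((p - 100) // s)  # ceil((100 - p) / s)
--         cur = max(cur, d)
--         if answer and cur == ind:
--             answer[-1] += 1
--         else:
--             answer.append(1)
--             ind = cur
--     return answer
-- ===== Notes on version B (the rewrite author's own statement) =====
-- stated objective: simpler
-- what changed: B fuses A's two passes into one loop over zip(progresses, speeds) that never materializes the running-max list temp, computes each completion day with the idiomatic ceiling division -((p-100)//s) instead of A's mod-test branch, and builds the group counts directly while threading the running max.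
import Mathlib
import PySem

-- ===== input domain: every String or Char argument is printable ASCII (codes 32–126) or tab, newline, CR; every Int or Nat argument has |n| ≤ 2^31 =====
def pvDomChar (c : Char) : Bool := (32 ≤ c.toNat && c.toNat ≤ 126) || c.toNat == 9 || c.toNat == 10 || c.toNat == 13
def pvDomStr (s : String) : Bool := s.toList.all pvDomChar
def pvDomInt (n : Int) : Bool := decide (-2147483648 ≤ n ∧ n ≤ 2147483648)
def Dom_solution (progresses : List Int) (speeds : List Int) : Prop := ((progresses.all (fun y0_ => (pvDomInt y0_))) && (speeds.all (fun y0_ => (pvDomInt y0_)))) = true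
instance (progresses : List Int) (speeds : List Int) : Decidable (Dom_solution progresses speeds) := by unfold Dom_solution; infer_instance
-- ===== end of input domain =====

-- B fuses A's two passes into one loop with no temp list, using ceiling division; objective: simpler one-pass rewrite.

-- ===== PORT A =====
-- answer[-1] += 1 (A's answer list is never empty: it starts as [1])
def incLastA (l : List Int) : List Int := l.dropLast ++ [l.getLast?.getD 0 + 1]

-- body of A's first loop (i ranges over range(len(progresses)); state = (res, temp))
def loop1A (ps ss : List Int) (st : Int × List Int) (i : Int) : Int × List Int :=
  let p := PySem.List.pyGetD ps i 0
  let sp := PySem.List.pyGetD ss i 0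
  let tmp := if PySem.Int.mod (100 - p) sp ≠ 0 then PySem.Int.floordiv (100 - p) sp + 1
             else PySem.Int.floordiv (100 - p) sp
  let res := max st.1 tmp
  (res, st.2 ++ [res])

-- body of A's second loop (i ranges over range(1, len(temp)); state = (answer, ind))
def loop2A (temp : List Int) (st : List Int × Int) (i : Int) : List Int × Int :=
  let t := PySem.List.pyGetD temp i 0
  if t = st.2 then (incLastA st.1, st.2) else (st.1 ++ [1], t)

def solution (progresses : List Int) (speeds : List Int) : List Int :=
  let temp := ((PySem.List.pyRange 0 (progresses.length : Int)).foldl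
    (loop1A progresses speeds) (0, [])).2
  ((PySem.List.pyRange 1 (temp.length : Int)).foldl (loop2A temp)
    ([1], PySem.List.pyGetD temp 0 0)).1

-- ===== PORT B =====
-- body of B's single loop over zip(progresses, speeds); state = (answer, cur, ind);
-- answer[-1] += 1 is written out as dropLast ++ [last + 1] (answer is nonempty in that branch)
def stepB (st : List Int × Int × Int) (x : Int × Int) : List Int × Int × Int :=
  let d := -(PySem.Int.floordiv (x.1 - 100) x.2)
  let cur := max st.2.1 d
  if st.1 ≠ [] ∧ cur = st.2.2 then (st.1.dropLast ++ [st.1.getLast?.getD 0 + 1], cur, st.2.2)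
  else (st.1 ++ [1], cur, cur)

def solution_alt (progresses : List Int) (speeds : List Int) : List Int :=
  ((progresses.zip speeds).foldl stepB ([], 0, 0)).1

-- ===== PRECONDITION & SPEC =====
-- Pre_ excludes exactly the inputs where A raises: empty progresses (IndexError at temp[0]),
-- speeds shorter than progresses (IndexError at speeds[i]), and a paired speed of 0 (ZeroDivisionError).
def Pre_solution (progresses : List Int) (speeds : List Int) : Prop :=
  progresses ≠ [] ∧ progresses.length ≤ speeds.length ∧ ∀ x ∈ progresses.zip speeds, x.2 ≠ 0
instance (progresses : List Int) (speeds : List Int) : Decidable (Pre_solution progresses speeds) := by unfold Pre_solution; infer_instance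

def pvWitness_solution : List Int × List Int := ([93, 30, 55], [1, 30, 5])

def Spec_solution (progresses : List Int) (speeds : List Int) (out : List Int) : Prop := out = solution_alt progresses speeds
instance (progresses : List Int) (speeds : List Int) (out : List Int) : Decidable (Spec_solution progresses speeds out) := by unfold Spec_solution; infer_instance

-- ===== CLAIM (what is proved, stated in full; the proofs are below) =====
def Claim_equal_solution : Prop := ∀ (progresses : List Int) (speeds : List Int), Dom_solution progresses speeds → Pre_solution progresses speeds → Spec_solution progresses speeds (solution progresses speeds)

-- ===== LEMMAS AND PROOFS =====

-- A's per-task completion day (the branch on the remainder)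
def dv (p s : Int) : Int :=
  if PySem.Int.mod (100 - p) s ≠ 0 then PySem.Int.floordiv (100 - p) s + 1
  else PySem.Int.floordiv (100 - p) s

def dlist (ps ss : List Int) : List Int := (ps.zip ss).map (fun x => dv x.1 x.2)

-- first-loop body on the day value alone
def stepA1 (st : Int × List Int) (d : Int) : Int × List Int :=
  (max st.1 d, st.2 ++ [max st.1 d])

-- second-loop body on the running-max value alone
def stepA2 (st : List Int × Int) (t : Int) : List Int × Int :=
  if t = st.2 then (incLastA st.1, st.2) else (st.1 ++ [1], t)

-- B's loop body on the day value alone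
def stepB' (st : List Int × Int × Int) (d : Int) : List Int × Int × Int :=
  let cur := max st.2.1 d
  if st.1 ≠ [] ∧ cur = st.2.2 then (st.1.dropLast ++ [st.1.getLast?.getD 0 + 1], cur, st.2.2)
  else (st.1 ++ [1], cur, cur)

-- prefix running maxima (A's temp list, for a given starting res)
def scanMax (r : Int) : List Int → List Int
  | [] => []
  | d :: ds => (max r d) :: scanMax (max r d) ds

theorem incLastA_ne_nil (l : List Int) : incLastA l ≠ [] := by simp [incLastA]

-- A's completion-day formula (mod-test branch) equals B's ceiling division, for s ≠ 0
theorem ceil_formula (a s : Int) (hs : s ≠ 0) :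
    -(PySem.Int.floordiv (-a) s) =
      (if PySem.Int.mod a s ≠ 0 then PySem.Int.floordiv a s + 1 else PySem.Int.floordiv a s) := by
  have h1 := PySem.Int.floordiv_mul_add_mod a s
  have h2 := PySem.Int.floordiv_mul_add_mod (-a) s
  set q1 := PySem.Int.floordiv a s with hq1
  set r1 := PySem.Int.mod a s with hr1
  set q2 := PySem.Int.floordiv (-a) s with hq2
  set r2 := PySem.Int.mod (-a) s with hr2
  have hsum : (q1 + q2) * s = -(r1 + r2) := by linear_combination h1 + h2
  rcases lt_or_gt_of_ne hs with hneg | hpos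
  · have b1 := PySem.Int.mod_neg_bounds a hneg
    have b2 := PySem.Int.mod_neg_bounds (-a) hneg
    have hk : q1 + q2 = 0 ∨ q1 + q2 = -1 := by
      have h0 : -1 ≤ q1 + q2 := by nlinarith
      have h1' : q1 + q2 ≤ 0 := by nlinarith
      omega
    rcases hk with hk | hk
    · have hz : r1 + r2 = 0 := by rw [hk] at hsum; omega
      have : r1 = 0 := by omega
      simp [this]; omega
    · have hr : r1 + r2 = s := by rw [hk] at hsum; omega
      have : r1 ≠ 0 := by omega
      simp [this]; omega
  · have b1n := PySem.Int.mod_nonneg a hpos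
    have b1l := PySem.Int.mod_lt a hpos
    have b2n := PySem.Int.mod_nonneg (-a) hpos
    have b2l := PySem.Int.mod_lt (-a) hpos
    have hk : q1 + q2 = 0 ∨ q1 + q2 = -1 := by
      have h0 : -1 ≤ q1 + q2 := by nlinarith
      have h1' : q1 + q2 ≤ 0 := by nlinarith
      omega
    rcases hk with hk | hk
    · have hz : r1 + r2 = 0 := by rw [hk] at hsum; omega
      have : r1 = 0 := by omega
      simp [this]; omega
    · have hr : r1 + r2 = s := by rw [hk] at hsum; omega
      have : r1 ≠ 0 := by omega
      simp [this]; omega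

-- iterating over the indices of two lists = iterating over their zip
theorem foldl_range_getD2 {α : Type} (g : α → Int → Int → α) :
    ∀ (ps ss : List Int) (init : α), ps.length ≤ ss.length →
      (List.range ps.length).foldl (fun st i => g st (ps.getD i 0) (ss.getD i 0)) init
        = (ps.zip ss).foldl (fun st x => g st x.1 x.2) init := by
  intro ps
  induction ps with
  | nil => intro ss init _; simp
  | cons p ps' ih =>
    intro ss init hlen
    cases ss with
    | nil => simp at hlen
    | cons s ss' =>
      simp only [List.length_cons, List.range_succ_eq_map, List.foldl_cons, List.foldl_map,
        List.zip_cons_cons, List.getD_cons_zero, List.getD_cons_succ]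
      exact ih ss' (g init p s) (by simpa using hlen)

-- iterating over the indices of a list = iterating over the list
theorem foldl_range_getD {α : Type} (g : α → Int → α) :
    ∀ (xs : List Int) (init : α),
      (List.range xs.length).foldl (fun st i => g st (xs.getD i 0)) init = xs.foldl g init := by
  intro xs
  induction xs with
  | nil => intro init; simp
  | cons x xs' ih =>
    intro init
    simp only [List.length_cons, List.range_succ_eq_map, List.foldl_cons, List.foldl_map,
      List.getD_cons_zero, List.getD_cons_succ]
    exact ih (g init x)

-- range(1, m+1) as a shifted List.range
theorem pyRange_one_shift (m : Nat) :
    PySem.List.pyRange 1 ((m : Nat) + 1 : Int) = (List.range m).map (fun i => ((i + 1 : Nat) : Int)) := by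
  induction m with
  | zero =>
    have h : ((0 : Nat) + 1 : Int) = 1 := by norm_num
    rw [h]
    decide
  | succ k ih =>
    rw [show ((k + 1 : Nat) + 1 : Int) = ((k : Nat) + 1 : Int) + 1 by push_cast; ring,
      PySem.List.pyRange_one_succ_right (by omega), ih, List.range_succ]
    simp

-- A's first loop produces acc ++ scanMax r ds in its second component
theorem phase1_scan :
    ∀ (ds : List Int) (r : Int) (acc : List Int),
      (ds.foldl stepA1 (r, acc)).2 = acc ++ scanMax r ds := by
  intro ds
  induction ds with
  | nil => intro r acc; simp [scanMax]
  | cons d ds' ih =>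
    intro r acc
    simp only [List.foldl_cons, scanMax, stepA1]
    rw [ih]
    simp

-- A's first loop (over range/indices) computes scanMax of the dv-list
theorem temp_eq (ps ss : List Int) (hlen : ps.length ≤ ss.length) :
    ((PySem.List.pyRange 0 (ps.length : Int)).foldl (loop1A ps ss) (0, [])).2
      = scanMax 0 (dlist ps ss) := by
  have hb : (PySem.List.pyRange 0 (ps.length : Int)).foldl (loop1A ps ss) (0, [])
      = (List.range ps.length).foldl
          (fun (st : Int × List Int) i => stepA1 st (dv (ps.getD i 0) (ss.getD i 0))) (0, []) := by
    rw [PySem.List.pyRange_zero_natCast, List.foldl_map]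
    apply PySem.List.foldl_congr_mem
    intro acc i _
    show loop1A ps ss acc ((i : Nat) : Int) = _
    simp only [loop1A, stepA1, dv, PySem.List.pyGetD_natCast]
  rw [hb, foldl_range_getD2 (fun st p s => stepA1 st (dv p s)) ps ss (0, []) hlen]
  rw [show (fun (st : Int × List Int) (x : Int × Int) => stepA1 st (dv x.1 x.2))
      = (fun st x => stepA1 st ((fun (y : Int × Int) => dv y.1 y.2) x)) from rfl]
  rw [← List.foldl_map]
  exact phase1_scan (dlist ps ss) 0 []

-- A's second loop over range(1, len(temp)) = a plain fold of stepA2 over temp.tail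
theorem phase2_eq (t : Int) (rest : List Int) :
    ((PySem.List.pyRange 1 (((t :: rest).length : Nat) : Int)).foldl (loop2A (t :: rest))
      ([1], PySem.List.pyGetD (t :: rest) 0 0)).1
      = (rest.foldl stepA2 ([1], t)).1 := by
  have h0 : PySem.List.pyGetD (t :: rest) 0 0 = t := by
    simp [PySem.List.pyGetD_zero_cons]
  rw [h0, show (((t :: rest).length : Nat) : Int) = ((rest.length : Nat) + 1 : Int) by simp]
  rw [pyRange_one_shift, List.foldl_map]
  have hb : (List.range rest.length).foldl
      (fun (st : List Int × Int) (i : Nat) => loop2A (t :: rest) st (((i + 1 : Nat) : Int))) ([1], t)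
      = (List.range rest.length).foldl
          (fun (st : List Int × Int) (i : Nat) => stepA2 st (rest.getD i 0)) ([1], t) := by
    apply PySem.List.foldl_congr_mem
    intro acc i _
    simp only [loop2A, stepA2, PySem.List.pyGetD_natCast, List.getD_cons_succ]
  rw [hb]
  exact congrArg Prod.fst (foldl_range_getD stepA2 rest ([1], t))

-- B's fused loop = A's second loop run on the running-max list
theorem fused_eq_grouped :
    ∀ (ds : List Int) (ans : List Int) (cur ind : Int), ans ≠ [] →
      ((ds.foldl stepB' (ans, cur, ind)).1)
        = (((scanMax cur ds).foldl stepA2 (ans, ind)).1) := by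
  intro ds
  induction ds with
  | nil => intro ans cur ind _; simp [scanMax]
  | cons d ds' ih =>
    intro ans cur ind hne
    simp only [List.foldl_cons, scanMax]
    by_cases h : max cur d = ind
    · rw [show stepB' (ans, cur, ind) d = (incLastA ans, max cur d, ind) by
        simp [stepB', incLastA, hne, h]]
      rw [show stepA2 (ans, ind) (max cur d) = (incLastA ans, ind) by simp [stepA2, h]]
      rw [ih (incLastA ans) (max cur d) ind (incLastA_ne_nil ans)]
    · rw [show stepB' (ans, cur, ind) d = (ans ++ [1], max cur d, max cur d) by
        simp [stepB', h]]
      rw [show stepA2 (ans, ind) (max cur d) = (ans ++ [1], max cur d) by simp [stepA2, h]]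
      exact ih (ans ++ [1]) (max cur d) (max cur d) (by simp)

-- B's loop over the zip = B's loop body on the dv-list (via the ceiling-division identity)
theorem alt_eq_dlist (ps ss : List Int) (hnz : ∀ x ∈ ps.zip ss, x.2 ≠ 0) :
    solution_alt ps ss = ((dlist ps ss).foldl stepB' ([], 0, 0)).1 := by
  unfold solution_alt
  have hb : (ps.zip ss).foldl stepB ([], 0, 0)
      = (ps.zip ss).foldl (fun st (x : Int × Int) => stepB' st (dv x.1 x.2)) ([], 0, 0) := by
    apply PySem.List.foldl_congr_mem
    intro acc x hx
    have hs := hnz x hx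
    have hd : -(PySem.Int.floordiv (x.1 - 100) x.2) = dv x.1 x.2 := by
      have : x.1 - 100 = -(100 - x.1) := by ring
      rw [this, ceil_formula (100 - x.1) x.2 hs, dv]
    simp only [stepB, stepB', hd]
  rw [hb]
  rw [show (fun (st : List Int × Int × Int) (x : Int × Int) => stepB' st (dv x.1 x.2))
      = (fun st x => stepB' st ((fun (y : Int × Int) => dv y.1 y.2) x)) from rfl]
  rw [← List.foldl_map]
  rfl

-- ===== VERDICT (by name: the statement is the Claim_ definition above) =====
theorem solution_spec : Claim_equal_solution := by
  intro ps ss _ hpre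
  obtain ⟨hne, hlen, hnz⟩ := hpre
  unfold Spec_solution
  have hzip : ps.zip ss ≠ [] := by
    cases ps with
    | nil => exact absurd rfl hne
    | cons p ps' =>
      cases ss with
      | nil => simp at hlen
      | cons s ss' => simp
  have hdl : dlist ps ss ≠ [] := by
    unfold dlist
    simpa using hzip
  obtain ⟨d0, ds', hds⟩ := List.exists_cons_of_ne_nil hdl
  -- A's side
  unfold solution
  simp only []
  rw [temp_eq ps ss hlen, hds]
  rw [show scanMax 0 (d0 :: ds') = max 0 d0 :: scanMax (max 0 d0) ds' from rfl]
  rw [phase2_eq (max 0 d0) (scanMax (max 0 d0) ds')]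
  -- B's side
  rw [alt_eq_dlist ps ss hnz, hds]
  rw [show (d0 :: ds').foldl stepB' ([], 0, 0) = ds'.foldl stepB' ([1], max 0 d0, max 0 d0) by
    simp [List.foldl_cons, stepB']]
  rw [fused_eq_grouped ds' [1] (max 0 d0) (max 0 d0) (by simp)]
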